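-- pv_equiv track=rewrite | github.com/woohree/ALGO2ITHM_STUDY | programmers/0809 2018 KAKAO BLIND RECRUITMENT/[1차] lv1 비밀지도/qogksqls.py | solution
-- ===== SOURCE A (Python) =====
-- def solve_bi(x):                                            # 2진수로 변환
--     bi = []
--     while x != 0:
--         bi.append(x%2)
--         x //= 2
--     return bi
--
-- def solution(n, arr1, arr2):
--     result = [[" " for _ in range(n)] for _ in range(n)]    # 결과 행렬
--     for i in range(n):
--         temp = solve_bi(arr1[i])
--         k = n - len(temp)
--         for j in range(len(temp)-1, -1, -1):
--             if temp[j] == 1: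
--                 result[i][k] = '#'
--             k += 1
--     for i in range(n):
--         temp = solve_bi(arr2[i])
--         k = n - len(temp)
--         for j in range(len(temp)-1, -1, -1):
--             if temp[j] == 1:
--                 result[i][k] = '#'
--             k += 1
--     answer = []
--     for row in result:
--         answer.append(''.join(row))
--     return answer
-- ===== SOURCE B (Python) =====
-- def solution(n, arr1, arr2):
--     tr = str.maketrans('10', '# ')
--     return [format(arr1[i] | arr2[i], f'0{n}b').translate(tr) for i in range(n)]
-- ===== Notes on version B (the rewrite author's own statement) =====
-- stated objective: idiomatic
-- what changed: Replaces A's pre-filled n-by-n character grid, manual digit-by-digit bit extraction and two separate painting passes with a single per-row pass that ORs the two rows and renders the result via zero-padded binary formatting and character translation.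
-- outside the precondition, e.g. on solution(1, [2], [0]): A returns ['#'], B returns ['# ']
import Mathlib
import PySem

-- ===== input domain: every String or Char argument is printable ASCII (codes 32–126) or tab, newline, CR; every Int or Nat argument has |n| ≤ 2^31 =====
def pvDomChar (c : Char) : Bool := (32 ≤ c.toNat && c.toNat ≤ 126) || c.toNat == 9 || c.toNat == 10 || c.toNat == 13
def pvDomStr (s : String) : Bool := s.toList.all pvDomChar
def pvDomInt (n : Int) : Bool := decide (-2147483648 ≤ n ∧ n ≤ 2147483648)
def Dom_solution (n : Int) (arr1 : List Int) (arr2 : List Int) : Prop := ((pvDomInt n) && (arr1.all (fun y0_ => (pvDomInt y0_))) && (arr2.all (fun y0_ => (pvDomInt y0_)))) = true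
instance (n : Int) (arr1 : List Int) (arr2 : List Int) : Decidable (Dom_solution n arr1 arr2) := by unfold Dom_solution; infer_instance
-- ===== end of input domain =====

-- B replaces A's pre-filled n×n char grid, manual bit extraction and two painting passes by one
-- per-row pass: OR the two rows, render as an n-wide zero-padded binary string, map '1'→'#','0'→' '.


-- ===== PORT A =====
-- solve_bi: the while loop, with fuel 64 (plenty for |x| ≤ 2^31 of Dom; on negative x the
-- Python loop diverges — those inputs are outside Pre_solution).
def solveBi (fuel : Nat) (x : Int) : List Int :=
  match fuel with
  | 0 => []
  | f + 1 => if x = 0 then [] else PySem.Int.mod x 2 :: solveBi f (PySem.Int.floordiv x 2)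

-- the inner 'for j in range(len(temp)-1, -1, -1)' loop, state (k, row); m = j + 1
def paintRow (temp : List Int) (m : Nat) (k : Int) (row : List Char) : List Char :=
  match m with
  | 0 => row
  | m' + 1 =>
    paintRow temp m' (k + 1)
      (if PySem.List.pyGetD temp (m' : Int) 0 = 1 then PySem.List.pySetD row k '#' else row)

-- one of the two identical 'for i in range(n)' painting passes (arr = arr1 resp. arr2)
def paintRows (arr : List Int) (n : Int) (res : List (List Char)) : List (List Char) :=
  (PySem.List.pyRange 0 n 1).foldl (fun res i =>
    PySem.List.pySetD res i
      (paintRow (solveBi 64 (PySem.List.pyGetD arr i 0))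
        (solveBi 64 (PySem.List.pyGetD arr i 0)).length
        (n - ((solveBi 64 (PySem.List.pyGetD arr i 0)).length : Int))
        (PySem.List.pyGetD res i []))) res

def solution (n : Int) (arr1 : List Int) (arr2 : List Int) : List String :=
  let result := List.replicate n.toNat (List.replicate n.toNat ' ')
  let result := paintRows arr1 n result
  let result := paintRows arr2 n result
  result.foldl (fun answer row => answer ++ [String.ofList row]) []

-- ===== PORT B =====
-- binary digits of x, most significant first ([] for 0)
def binDigits (x : Nat) : List Char :=
  if x = 0 then [] else binDigits (x / 2) ++ [if x % 2 = 1 then '1' else '0']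
  decreasing_by exact Nat.div_lt_self (by omega) (by omega)

-- format(v, f'0{w}b') as a char list (digit string of v, zero-padded on the left to width w;
-- a '-' sign, which no input inside Pre_solution produces, counts into the width as in Python)
def fmtBin (v : Int) (w : Int) : List Char :=
  if v < 0 then
    '-' :: (List.replicate ((w - 1) - ((binDigits (-v).toNat).length : Int)).toNat '0' ++
      binDigits (-v).toNat)
  else if v = 0 then
    List.replicate (w - 1).toNat '0' ++ ['0']
  else
    List.replicate (w - ((binDigits v.toNat).length : Int)).toNat '0' ++ binDigits v.toNat

-- str.maketrans('10', '# ') applied charwise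
def trChar (c : Char) : Char := if c = '1' then '#' else if c = '0' then ' ' else c

def solution_alt (n : Int) (arr1 : List Int) (arr2 : List Int) : List String :=
  (PySem.List.pyRange 0 n 1).map (fun i =>
    String.ofList ((fmtBin (PySem.Int.bor (PySem.List.pyGetD arr1 i 0) (PySem.List.pyGetD arr2 i 0)) n).map trChar))

-- ===== PRECONDITION & SPEC =====
-- Pre_ restricts to the problem's natural domain (for positive n: rows of length ≥ n and entries
-- 0 ≤ v < 2^n; for n ≤ 0 both programs return [] and nothing is required): outside it A diverges
-- (negative entries), raises IndexError (rows shorter than n, or entries ≥ 2^(2n)), or paints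
-- through negative wrapped-around column indices (entries in [2^n, 2^(2n))).
def Pre_solution (n : Int) (arr1 : List Int) (arr2 : List Int) : Prop :=
  n ≤ (arr1.length : Int) ∧ n ≤ (arr2.length : Int) ∧
  ∀ i ∈ PySem.List.pyRange 0 n 1,
    0 ≤ PySem.List.pyGetD arr1 i 0 ∧ PySem.List.pyGetD arr1 i 0 < 2 ^ n.toNat ∧
    0 ≤ PySem.List.pyGetD arr2 i 0 ∧ PySem.List.pyGetD arr2 i 0 < 2 ^ n.toNat
instance (n : Int) (arr1 : List Int) (arr2 : List Int) : Decidable (Pre_solution n arr1 arr2) := by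
  unfold Pre_solution; infer_instance

def pvWitness_solution : Int × List Int × List Int := (2, [1, 2], [2, 3])

def Spec_solution (n : Int) (arr1 : List Int) (arr2 : List Int) (out : List String) : Prop := out = solution_alt n arr1 arr2
instance (n : Int) (arr1 : List Int) (arr2 : List Int) (out : List String) : Decidable (Spec_solution n arr1 arr2 out) := by unfold Spec_solution; infer_instance

-- ===== CLAIM (what is proved, stated in full; the proofs are below) =====
def Claim_equal_solution : Prop := ∀ (n : Int) (arr1 : List Int) (arr2 : List Int), Dom_solution n arr1 arr2 → Pre_solution n arr1 arr2 → Spec_solution n arr1 arr2 (solution n arr1 arr2)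

-- ===== LEMMAS AND PROOFS =====

-- binary digits of x, least significant first, as A's solve_bi produces them
def bitsL (x : Nat) : List Int :=
  (List.range (PySem.Int.bitLength (x : Int))).map (fun j => if x.testBit j then 1 else 0)

-- the row both programs compute: position p shows bit (nn-1-p) of the row value
def rowSpec (nn : Nat) (v : Nat) : List Char :=
  (List.range nn).map (fun p => if v.testBit (nn - 1 - p) then '#' else ' ')

lemma nat_lt_two_pow_bitLength (x : Nat) : x < 2 ^ PySem.Int.bitLength (x : Int) := by
  have := PySem.Int.lt_two_pow_bitLength (x : Int); simpa using this

lemma bitLength_le_of_lt {x m : Nat} (h : x < 2 ^ m) : PySem.Int.bitLength (x : Int) ≤ m := by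
  rcases Nat.eq_zero_or_pos x with rfl | hx
  · simp [PySem.Int.bitLength_zero]
  · have h2 := PySem.Int.two_pow_bitLength_le (x : Int) (by exact_mod_cast hx.ne')
    have h2' : 2 ^ (PySem.Int.bitLength (x : Int) - 1) ≤ x := by simpa using h2
    have hlt : 2 ^ (PySem.Int.bitLength (x : Int) - 1) < 2 ^ m := lt_of_le_of_lt h2' h
    have := Nat.pow_lt_pow_iff_right (a := 2) (by omega) |>.mp hlt
    omega

lemma testBit_false_of_bitLength_le {x j : Nat} (h : PySem.Int.bitLength (x : Int) ≤ j) :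
    x.testBit j = false := by
  exact Nat.testBit_lt_two_pow (lt_of_lt_of_le (nat_lt_two_pow_bitLength x)
    (Nat.pow_le_pow_right (by omega) h))

lemma solveBi_eq (f : Nat) (x : Nat) (h : x < 2 ^ f) : solveBi f (x : Int) = bitsL x := by
  induction f generalizing x with
  | zero =>
    interval_cases x
    simp [solveBi, bitsL, PySem.Int.bitLength_zero]
  | succ f ih =>
    rcases Nat.eq_zero_or_pos x with rfl | hx
    · simp [solveBi, bitsL, PySem.Int.bitLength_zero]
    · rw [solveBi]
      rw [if_neg (by exact_mod_cast hx.ne')]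
      have hmod : PySem.Int.mod (x : Int) 2 = ((x % 2 : Nat) : Int) := PySem.Int.mod_natCast x 2
      have hdiv : PySem.Int.floordiv (x : Int) 2 = ((x / 2 : Nat) : Int) :=
        PySem.Int.floordiv_natCast x 2
      rw [hmod, hdiv, ih (x / 2) (by omega)]
      unfold bitsL
      rw [PySem.Int.bitLength_natCast hx, List.range_succ_eq_map]
      simp only [List.map_cons, List.map_map]
      congr 1
      · rcases Nat.mod_two_eq_zero_or_one x with h2 | h2 <;> simp [Nat.testBit_zero, h2]
      · apply List.map_congr_left
        intro j hj
        simp [Function.comp, Nat.testBit_succ]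

lemma length_bitsL (x : Nat) : (bitsL x).length = PySem.Int.bitLength (x : Int) := by
  simp [bitsL]

lemma getD_bitsL (x j : Nat) : (bitsL x).getD j 0 = if x.testBit j then 1 else 0 := by
  by_cases hj : j < PySem.Int.bitLength (x : Int)
  · rw [List.getD_eq_getElem _ _ (by simpa [bitsL])]
    simp [bitsL]
  · rw [List.getD_eq_default _ _ (by simpa [bitsL] using hj)]
    rw [testBit_false_of_bitLength_le (by omega)]
    simp

lemma paintRow_length (temp : List Int) (m : Nat) (k : Int) (row : List Char) :
    (paintRow temp m k row).length = row.length := by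
  induction m generalizing k row with
  | zero => rfl
  | succ m' ih =>
    rw [paintRow, ih]
    split <;> simp [PySem.List.length_pySetD]

lemma getD_set_char (l : List Char) (i j : Nat) (a d : Char) (hi : i < l.length) :
    (l.set i a).getD j d = if i = j then a else l.getD j d := by
  simp only [List.getD_eq_getElem?_getD, List.getElem?_set]
  split_ifs with h1 <;> simp_all

lemma paintRow_getD (temp : List Int) (m : Nat) (k : Int) (row : List Char)
    (hk : 0 ≤ k) (hkm : k.toNat + m ≤ row.length) (p : Nat) :
    (paintRow temp m k row).getD p ' ' =
      if k.toNat ≤ p ∧ p < k.toNat + m ∧ temp.getD (k.toNat + m - 1 - p) 0 = 1 then '#'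
      else row.getD p ' ' := by
  induction m generalizing k row with
  | zero => rw [if_neg (by omega)]; rfl
  | succ m' ih =>
    rw [paintRow]
    have hk1 : (0:Int) ≤ k + 1 := by omega
    have hkt : (k+1).toNat = k.toNat + 1 := by omega
    have hklen : k.toNat < row.length := by omega
    set row' := if PySem.List.pyGetD temp (m' : Int) 0 = 1 then PySem.List.pySetD row k '#' else row
      with hrow'
    have hlen' : row'.length = row.length := by
      rw [hrow']; split <;> simp [PySem.List.length_pySetD]
    rw [ih (k+1) row' hk1 (by omega)]
    have hget' : row'.getD p ' ' =
        if k.toNat = p ∧ temp.getD m' 0 = 1 then '#' else row.getD p ' ' := by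
      rw [hrow']
      split_ifs with h1 h2 h3
      · rw [PySem.List.pySetD_of_nonneg _ _ hk, getD_set_char _ _ _ _ _ hklen, if_pos h2.1]
      · rw [PySem.List.pySetD_of_nonneg _ _ hk, getD_set_char _ _ _ _ _ hklen]
        rw [if_neg (fun hc => h2 ⟨hc, by simpa [PySem.List.pyGetD_natCast] using h1⟩)]
      · exact absurd (by simpa [PySem.List.pyGetD_natCast] using h3.2) h1
      · rfl
    rw [hget', hkt]
    have hidx : k.toNat + 1 + m' - 1 - p = k.toNat + (m' + 1) - 1 - p := by omega
    rw [hidx]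
    by_cases hp1 : p = k.toNat
    · subst hp1
      have hidx2 : k.toNat + (m' + 1) - 1 - k.toNat = m' := by omega
      rw [if_neg (show ¬(k.toNat + 1 ≤ k.toNat ∧ k.toNat < k.toNat + 1 + m' ∧
            temp.getD (k.toNat + (m' + 1) - 1 - k.toNat) 0 = 1) by rintro ⟨h1, _, _⟩; omega)]
      rw [hidx2]
      by_cases hb : temp.getD m' 0 = 1
      · rw [if_pos ⟨rfl, hb⟩, if_pos ⟨le_rfl, by omega, hb⟩]
      · rw [if_neg (show ¬(k.toNat = k.toNat ∧ temp.getD m' 0 = 1) by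
              rintro ⟨_, hc⟩; exact hb hc),
            if_neg (show ¬(k.toNat ≤ k.toNat ∧ k.toNat < k.toNat + (m' + 1) ∧
              temp.getD m' 0 = 1) by rintro ⟨_, _, hc⟩; exact hb hc)]
    · rw [if_neg (show ¬(k.toNat = p ∧ temp.getD m' 0 = 1) by
          rintro ⟨hc, _⟩; exact hp1 hc.symm)]
      congr 1
      simp only [eq_iff_iff]
      constructor
      · rintro ⟨h1, h2, h3⟩; exact ⟨by omega, by omega, h3⟩
      · rintro ⟨h1, h2, h3⟩; exact ⟨by omega, by omega, h3⟩

-- one painting pass with temp = bits of x paints exactly the set bits of x into the row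
lemma paint_bits_getD (x nn : Nat) (row : List Char) (hrow : row.length = nn)
    (hbl : PySem.Int.bitLength (x : Int) ≤ nn) (p : Nat) :
    (paintRow (bitsL x) (bitsL x).length ((nn : Int) - ((bitsL x).length : Int)) row).getD p ' ' =
      if p < nn ∧ x.testBit (nn - 1 - p) then '#' else row.getD p ' ' := by
  set L := PySem.Int.bitLength (x : Int) with hL
  have hlen : (bitsL x).length = L := length_bitsL x
  have hknn : ((nn : Int) - ((bitsL x).length : Int)).toNat = nn - L := by
    rw [hlen]; omega
  rw [paintRow_getD _ _ _ _ (by rw [hlen]; omega) (by rw [hknn, hlen]; omega), hknn, hlen]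
  have harith : nn - L + L = nn := by omega
  rw [harith]
  by_cases hp : p < nn
  · by_cases ht : x.testBit (nn - 1 - p) = true
    · have hlt : nn - 1 - p < L := by
        by_contra hge
        rw [testBit_false_of_bitLength_le (by omega)] at ht
        simp at ht
      rw [if_pos ⟨by omega, hp, by rw [getD_bitsL]; simp [ht]⟩, if_pos ⟨hp, ht⟩]
    · rw [if_neg (by
          rintro ⟨h1, h2, h3⟩
          rw [getD_bitsL] at h3
          rw [Bool.not_eq_true] at ht
          rw [ht] at h3
          simp at h3),
        if_neg (by rintro ⟨_, h2⟩; exact ht h2)]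
  · rw [if_neg (by omega), if_neg (by rintro ⟨h1, _⟩; omega)]

-- A's two painting passes over one row produce rowSpec of the OR of the two values
lemma row_eq (a b nn : Nat) (ha : PySem.Int.bitLength (a : Int) ≤ nn)
    (hb : PySem.Int.bitLength (b : Int) ≤ nn) :
    paintRow (bitsL b) (bitsL b).length ((nn : Int) - ((bitsL b).length : Int))
      (paintRow (bitsL a) (bitsL a).length ((nn : Int) - ((bitsL a).length : Int))
        (List.replicate nn ' ')) = rowSpec nn (a ||| b) := by
  have hlen1 : (paintRow (bitsL a) (bitsL a).length ((nn : Int) - ((bitsL a).length : Int))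
      (List.replicate nn ' ')).length = nn := by rw [paintRow_length]; simp
  apply List.ext_getElem
  · rw [paintRow_length, hlen1]; simp [rowSpec]
  · intro p hp1 hp2
    have hpnn : p < nn := by rw [paintRow_length, hlen1] at hp1; exact hp1
    rw [← List.getD_eq_getElem _ ' ' hp1]
    rw [paint_bits_getD b nn _ hlen1 hb p]
    rw [paint_bits_getD a nn _ (by simp) ha p]
    have hrep : (List.replicate nn ' ').getD p ' ' = ' ' := by
      rw [List.getD_eq_getElem _ _ (by simpa)]; simp
    rw [hrep]
    simp only [rowSpec, List.getElem_map, List.getElem_range]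
    rw [Nat.testBit_or]
    by_cases hta : a.testBit (nn - 1 - p) <;> by_cases htb : b.testBit (nn - 1 - p) <;>
      simp [hta, htb, hpnn]

lemma rev_map_range {α : Type} (g : Nat → α) (m : Nat) :
    ((List.range m).map g).reverse = (List.range m).map (fun p => g (m - 1 - p)) := by
  apply List.ext_getElem
  · simp
  · intro p hp1 hp2
    simp only [List.length_reverse, List.length_map, List.length_range] at hp1
    rw [List.getElem_reverse]
    simp only [List.getElem_map, List.getElem_range, List.length_map, List.length_range]

lemma binDigits_eq (x : Nat) (hx : x ≠ 0) :
    binDigits x =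
      ((List.range (PySem.Int.bitLength (x : Int))).map
        (fun j => if x.testBit j then '1' else '0')).reverse := by
  induction x using Nat.strong_induction_on with
  | _ x ih =>
    rw [binDigits, if_neg hx]
    have hpos : 0 < x := by omega
    rw [PySem.Int.bitLength_natCast hpos, List.range_succ_eq_map]
    by_cases h2 : x / 2 = 0
    · have hL : PySem.Int.bitLength ((x / 2 : Nat) : Int) = 0 := by
        rw [h2]; exact PySem.Int.bitLength_zero
      rw [binDigits, if_pos h2, hL]
      simp only [List.range_zero, List.map_nil, List.map_cons, List.reverse_cons,
        List.reverse_nil, List.nil_append]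
      have hx1 : x = 1 := by omega
      subst hx1
      simp [Nat.testBit_zero]
    · rw [ih (x / 2) (Nat.div_lt_self hpos (by omega)) h2]
      simp only [List.map_cons, List.reverse_cons, List.map_map]
      congr 1
      · congr 1
        apply List.map_congr_left
        intro j hj
        simp [Function.comp, Nat.testBit_succ]
      · rcases Nat.mod_two_eq_zero_or_one x with h | h <;> simp [Nat.testBit_zero, h]

-- B's rendering of one row equals rowSpec
lemma fmtBin_row (v nn : Nat) (h1 : 1 ≤ nn) (hbl : PySem.Int.bitLength (v : Int) ≤ nn) :
    (fmtBin (v : Int) (nn : Int)).map trChar = rowSpec nn v := by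
  rw [fmtBin, if_neg (by omega)]
  by_cases hv : v = 0
  · subst hv
    rw [if_pos (by norm_num)]
    have ht : ((nn : Int) - 1).toNat = nn - 1 := by omega
    rw [ht]
    simp only [List.map_append, List.map_replicate, List.map_cons, List.map_nil]
    have htr : trChar '0' = ' ' := by decide
    rw [htr]
    rw [show List.replicate (nn - 1) ' ' ++ [' '] = List.replicate ((nn - 1) + 1) ' ' from
      (List.replicate_succ' ..).symm]
    rw [show (nn - 1) + 1 = nn by omega]
    symm
    unfold rowSpec
    rw [List.eq_replicate_iff]
    refine ⟨by simp, ?_⟩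
    intro c hc
    simp only [List.mem_map, List.mem_range] at hc
    obtain ⟨p, _, hp⟩ := hc
    simpa [Nat.zero_testBit] using hp.symm
  · rw [if_neg (by exact_mod_cast hv)]
    simp only [Int.toNat_natCast]
    set L := PySem.Int.bitLength (v : Int) with hL
    rw [binDigits_eq v hv, rev_map_range]
    simp only [List.length_map, List.length_range]
    have ht : ((nn : Int) - (L : Nat)).toNat = nn - L := by omega
    rw [ht]
    simp only [List.map_append, List.map_replicate, List.map_map]
    have htr : trChar '0' = ' ' := by decide
    rw [htr]
    apply List.ext_getElem
    · simp only [List.length_append, List.length_replicate, List.length_map, List.length_range,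
        rowSpec]
      omega
    · intro p hp1 hp2
      have hplen : p < nn := by
        simp only [List.length_append, List.length_replicate, List.length_map,
          List.length_range] at hp1
        omega
      simp only [rowSpec, List.getElem_map, List.getElem_range]
      by_cases hcase : p < nn - L
      · rw [List.getElem_append_left (by simpa)]
        simp only [List.getElem_replicate]
        rw [testBit_false_of_bitLength_le (show L ≤ nn - 1 - p by omega)]
        simp
      · rw [List.getElem_append_right (by simp; omega)]
        simp only [List.getElem_map, List.getElem_range, List.length_replicate,
          Function.comp_apply]
        have hidx : L - 1 - (p - (nn - L)) = nn - 1 - p := by omega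
        rw [hidx]
        by_cases htb : v.testBit (nn - 1 - p) <;> simp [htb, trChar]

lemma getD_set_list (l : List (List Char)) (i j : Nat) (a : List Char) (hi : i < l.length) :
    (l.set i a).getD j [] = if i = j then a else l.getD j [] := by
  simp only [List.getD_eq_getElem?_getD, List.getElem?_set]
  split_ifs with h1 <;> simp_all

-- characterisation of one 'for i in range(n)' painting pass of A
lemma paintRows_char (arr : List Int) (n : Int) (m : Nat) (res : List (List Char))
    (h : m ≤ res.length) :
    ((PySem.List.pyRange 0 (m : Int) 1).foldl (fun res i =>
        PySem.List.pySetD res i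
          (paintRow (solveBi 64 (PySem.List.pyGetD arr i 0))
            (solveBi 64 (PySem.List.pyGetD arr i 0)).length
            (n - ((solveBi 64 (PySem.List.pyGetD arr i 0)).length : Int))
            (PySem.List.pyGetD res i []))) res).length = res.length ∧
    ∀ p : Nat, ((PySem.List.pyRange 0 (m : Int) 1).foldl (fun res i =>
        PySem.List.pySetD res i
          (paintRow (solveBi 64 (PySem.List.pyGetD arr i 0))
            (solveBi 64 (PySem.List.pyGetD arr i 0)).length
            (n - ((solveBi 64 (PySem.List.pyGetD arr i 0)).length : Int))
            (PySem.List.pyGetD res i []))) res).getD p []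
      = if p < m then
          paintRow (solveBi 64 (arr.getD p 0)) (solveBi 64 (arr.getD p 0)).length
            (n - ((solveBi 64 (arr.getD p 0)).length : Int)) (res.getD p [])
        else res.getD p [] := by
  induction m with
  | zero =>
    rw [show ((0 : Nat) : Int) = 0 by rfl, PySem.List.pyRange_one_eq_nil (by omega)]
    simp
  | succ m ih =>
    obtain ⟨ihlen, ihget⟩ := ih (by omega)
    rw [show ((m + 1 : Nat) : Int) = (m : Int) + 1 by push_cast; ring,
      PySem.List.pyRange_one_succ_right (by omega), List.foldl_append]
    simp only [List.foldl_cons, List.foldl_nil]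
    rw [PySem.List.pyGetD_natCast, PySem.List.pyGetD_natCast, PySem.List.pySetD_natCast]
    constructor
    · rw [List.length_set, ihlen]
    · intro p
      rw [getD_set_list _ _ _ _ (by rw [ihlen]; omega)]
      by_cases hpm : m = p
      · subst hpm
        rw [if_pos rfl, ihget m, if_neg (by omega), if_pos (by omega)]
      · rw [if_neg hpm, ihget p]
        by_cases hp : p < m
        · rw [if_pos hp, if_pos (by omega)]
        · rw [if_neg hp, if_neg (by omega)]

-- ===== VERDICT (by name: the statement is the Claim_ definition above) =====
theorem solution_spec : Claim_equal_solution := by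
  intro n arr1 arr2 hdom hpre
  obtain ⟨hlen1, hlen2, hvals⟩ := hpre
  unfold Spec_solution
  by_cases hn0 : n ≤ 0
  · -- n ≤ 0: range(n) is empty, both programs return []
    unfold solution solution_alt paintRows
    rw [PySem.List.pyRange_one_eq_nil (by omega)]
    simp [Int.toNat_of_nonpos hn0]
  rw [not_le] at hn0
  obtain ⟨m, rfl⟩ : ∃ m : Nat, n = (m : Int) := ⟨n.toNat, by omega⟩
  simp only [Int.toNat_natCast] at hvals
  -- per-row facts
  have hrow : ∀ p : Nat, p < m →
      paintRow (solveBi 64 (arr2.getD p 0)) (solveBi 64 (arr2.getD p 0)).length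
        ((m : Int) - ((solveBi 64 (arr2.getD p 0)).length : Int))
        (paintRow (solveBi 64 (arr1.getD p 0)) (solveBi 64 (arr1.getD p 0)).length
          ((m : Int) - ((solveBi 64 (arr1.getD p 0)).length : Int)) (List.replicate m ' '))
      = rowSpec m ((arr1.getD p 0).toNat ||| (arr2.getD p 0).toNat) := by
    intro p hp
    have hmem : (p : Int) ∈ PySem.List.pyRange 0 (m : Int) 1 := by
      rw [PySem.List.mem_pyRange_one]; omega
    have hv := hvals (p : Int) hmem
    rw [PySem.List.pyGetD_natCast, PySem.List.pyGetD_natCast] at hv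
    obtain ⟨ha0, haU, hb0, hbU⟩ := hv
    set A := (arr1.getD p 0).toNat with hA
    set B := (arr2.getD p 0).toNat with hB
    have hcastA : arr1.getD p 0 = (A : Int) := by omega
    have hcastB : arr2.getD p 0 = (B : Int) := by omega
    have hAm : A < 2 ^ m := by
      have : ((A : Int)) < 2 ^ m := by rw [← hcastA]; exact_mod_cast haU
      exact_mod_cast this
    have hBm : B < 2 ^ m := by
      have : ((B : Int)) < 2 ^ m := by rw [← hcastB]; exact_mod_cast hbU
      exact_mod_cast this
    have hdomA : A < 2 ^ 64 := by
      have hmemA : arr1.getD p 0 ∈ arr1 := by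
        rw [List.getD_eq_getElem _ _ (by omega)]; exact List.getElem_mem _
      have := (List.all_eq_true.mp (by
        unfold Dom_solution at hdom
        simp only [Bool.and_eq_true] at hdom
        exact hdom.1.2)) _ hmemA
      simp only [pvDomInt, decide_eq_true_eq] at this
      have : (A : Int) ≤ 2147483648 := by omega
      have hA31 : A ≤ 2147483648 := by exact_mod_cast this
      calc A ≤ 2147483648 := hA31
        _ < 2 ^ 64 := by norm_num
    have hdomB : B < 2 ^ 64 := by
      have hmemB : arr2.getD p 0 ∈ arr2 := by
        rw [List.getD_eq_getElem _ _ (by omega)]; exact List.getElem_mem _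
      have := (List.all_eq_true.mp (by
        unfold Dom_solution at hdom
        simp only [Bool.and_eq_true] at hdom
        exact hdom.2)) _ hmemB
      simp only [pvDomInt, decide_eq_true_eq] at this
      have : (B : Int) ≤ 2147483648 := by omega
      have hB31 : B ≤ 2147483648 := by exact_mod_cast this
      calc B ≤ 2147483648 := hB31
        _ < 2 ^ 64 := by norm_num
    rw [hcastA, hcastB, solveBi_eq 64 A hdomA, solveBi_eq 64 B hdomB]
    exact row_eq A B m (bitLength_le_of_lt hAm) (bitLength_le_of_lt hBm)
  -- the grid after A's two passes
  have hres0 : (List.replicate m (List.replicate m ' ')).length = m := by simp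
  have h1 := paintRows_char arr1 (m : Int) m (List.replicate m (List.replicate m ' ')) (by simp)
  have h2 := paintRows_char arr2 (m : Int) m
    ((PySem.List.pyRange 0 (m : Int) 1).foldl (fun res i =>
        PySem.List.pySetD res i
          (paintRow (solveBi 64 (PySem.List.pyGetD arr1 i 0))
            (solveBi 64 (PySem.List.pyGetD arr1 i 0)).length
            ((m : Int) - ((solveBi 64 (PySem.List.pyGetD arr1 i 0)).length : Int))
            (PySem.List.pyGetD res i []))) (List.replicate m (List.replicate m ' ')))
    (by rw [h1.1]; simp)
  -- the final grid as a map
  have hfinal : (PySem.List.pyRange 0 (m : Int) 1).foldl (fun res i =>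
        PySem.List.pySetD res i
          (paintRow (solveBi 64 (PySem.List.pyGetD arr2 i 0))
            (solveBi 64 (PySem.List.pyGetD arr2 i 0)).length
            ((m : Int) - ((solveBi 64 (PySem.List.pyGetD arr2 i 0)).length : Int))
            (PySem.List.pyGetD res i [])))
      ((PySem.List.pyRange 0 (m : Int) 1).foldl (fun res i =>
        PySem.List.pySetD res i
          (paintRow (solveBi 64 (PySem.List.pyGetD arr1 i 0))
            (solveBi 64 (PySem.List.pyGetD arr1 i 0)).length
            ((m : Int) - ((solveBi 64 (PySem.List.pyGetD arr1 i 0)).length : Int))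
            (PySem.List.pyGetD res i []))) (List.replicate m (List.replicate m ' ')))
      = (List.range m).map
          (fun p => rowSpec m ((arr1.getD p 0).toNat ||| (arr2.getD p 0).toNat)) := by
    apply List.ext_getElem
    · rw [h2.1, h1.1]; simp
    · intro p hp1 hp2
      have hpm : p < m := by
        simp only [List.length_map, List.length_range] at hp2; exact hp2
      rw [← List.getD_eq_getElem _ [] hp1, h2.2 p, if_pos hpm]
      have hg1 : ((PySem.List.pyRange 0 (m : Int) 1).foldl (fun res i =>
          PySem.List.pySetD res i
            (paintRow (solveBi 64 (PySem.List.pyGetD arr1 i 0))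
              (solveBi 64 (PySem.List.pyGetD arr1 i 0)).length
              ((m : Int) - ((solveBi 64 (PySem.List.pyGetD arr1 i 0)).length : Int))
              (PySem.List.pyGetD res i []))) (List.replicate m (List.replicate m ' '))).getD p []
          = paintRow (solveBi 64 (arr1.getD p 0)) (solveBi 64 (arr1.getD p 0)).length
              ((m : Int) - ((solveBi 64 (arr1.getD p 0)).length : Int)) (List.replicate m ' ') := by
        rw [h1.2 p, if_pos hpm]
        congr 1
        rw [List.getD_eq_getElem _ _ (by simpa), List.getElem_replicate]
      rw [hg1, hrow p hpm]
      simp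
  -- assemble A's output
  show solution (m : Int) arr1 arr2 = solution_alt (m : Int) arr1 arr2
  unfold solution solution_alt paintRows
  simp only [Int.toNat_natCast]
  rw [hfinal, PySem.List.foldl_append_singleton_eq_map, List.nil_append]
  -- assemble B's output
  rw [PySem.List.pyRange_one, List.map_map, List.map_map]
  simp only [Int.sub_zero, Int.toNat_natCast]
  apply List.map_congr_left
  intro p hp
  have hpm : p < m := List.mem_range.mp hp
  simp only [Function.comp_apply]
  have hmem : ((0 : Int) + (p : Int)) ∈ PySem.List.pyRange 0 (m : Int) 1 := by
    rw [PySem.List.mem_pyRange_one]; omega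
  have hv := hvals _ hmem
  rw [show ((0 : Int) + (p : Int)) = ((p : Nat) : Int) by ring] at *
  rw [PySem.List.pyGetD_natCast, PySem.List.pyGetD_natCast] at hv ⊢
  obtain ⟨ha0, haU, hb0, hbU⟩ := hv
  set A := (arr1.getD p 0).toNat with hA
  set B := (arr2.getD p 0).toNat with hB
  have hcastA : arr1.getD p 0 = (A : Int) := by omega
  have hcastB : arr2.getD p 0 = (B : Int) := by omega
  have hABm : A ||| B < 2 ^ m := by
    apply Nat.or_lt_two_pow
    · have : ((A : Int)) < 2 ^ m := by rw [← hcastA]; exact_mod_cast haU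
      exact_mod_cast this
    · have : ((B : Int)) < 2 ^ m := by rw [← hcastB]; exact_mod_cast hbU
      exact_mod_cast this
  rw [hcastA, hcastB, PySem.Int.bor_natCast]
  rw [fmtBin_row (A ||| B) m (by omega) (bitLength_le_of_lt hABm)]
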